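-- pv_equiv track=rewrite | github.com/YHYen/Feature_Generation | Fix_Csv.py | change_Label_By_Split_Comma
-- ===== SOURCE A (Python) =====
-- def change_Label_By_Split_Comma(List, Speaker):
--     Label = []
--     Location = []
--     POS = []
--     for i in range(len(List)):
--         Pos_List, Location_List = find_Location_List(List[i])
--         POS.append(Pos_List)
--         Location.append(Location_List)
--         if Speaker[i][0] == '0':
--             Label.append(0)
--         elif Speaker[i][0] == '34':
--             Label.append(4)
--         else:
--             Comma_Index_List = find_Comma_Index(Location_List)
--             for j in range(len(Comma_Index_List)):
--                 label = 0
--                 if int(Speaker[i][0]) > Comma_Index_List[j]: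
--                     label = j
--             Label.append(label)
--     return POS, Location, Label
--
-- def find_Location_List(List):
--     Location_List_start = List.index('99')
--     Location_List = List[Location_List_start+1:]
--     POS_List = List[:Location_List_start+1]
--     return POS_List, Location_List
--
-- def find_Comma_Index(List):
--     Comma_Index_List = [0]
--     index = 0
--     while True:
--         try:
--             Comma_Index = List.index('19', index)
--             Comma_Index_List.append(Comma_Index)
--             index = Comma_Index+1
--         except ValueError:
--             break
--     return Comma_Index_List
-- ===== SOURCE B (Python) =====
-- def change_Label_By_Split_Comma(List, Speaker):
--     POS, Location, Label = [], [], []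
--     for row, sp in zip(List, Speaker):
--         cut = row.index('99') + 1
--         loc = row[cut:]
--         POS.append(row[:cut])
--         Location.append(loc)
--         Label.append(_comma_label(loc, sp[0]))
--     return POS, Location, Label
--
-- def _comma_label(loc, s):
--     if s == '0':
--         return 0
--     if s == '34':
--         return 4
--     positions = [k for k, v in enumerate(loc) if v == '19']
--     last = positions[-1] if positions else 0
--     return len(positions) if int(s) > last else 0
-- ===== Notes on version B (the rewrite author's own statement) =====
-- stated objective: simpler
-- what changed: Instead of rebuilding [0]+all-'19'-indices and running A's reset-label inner loop, B computes the label in closed form from one enumerate comprehension (count of '19' positions if the speaker index exceeds the last one, else 0), iterating rows with zip instead of range indexing.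
import Mathlib
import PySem

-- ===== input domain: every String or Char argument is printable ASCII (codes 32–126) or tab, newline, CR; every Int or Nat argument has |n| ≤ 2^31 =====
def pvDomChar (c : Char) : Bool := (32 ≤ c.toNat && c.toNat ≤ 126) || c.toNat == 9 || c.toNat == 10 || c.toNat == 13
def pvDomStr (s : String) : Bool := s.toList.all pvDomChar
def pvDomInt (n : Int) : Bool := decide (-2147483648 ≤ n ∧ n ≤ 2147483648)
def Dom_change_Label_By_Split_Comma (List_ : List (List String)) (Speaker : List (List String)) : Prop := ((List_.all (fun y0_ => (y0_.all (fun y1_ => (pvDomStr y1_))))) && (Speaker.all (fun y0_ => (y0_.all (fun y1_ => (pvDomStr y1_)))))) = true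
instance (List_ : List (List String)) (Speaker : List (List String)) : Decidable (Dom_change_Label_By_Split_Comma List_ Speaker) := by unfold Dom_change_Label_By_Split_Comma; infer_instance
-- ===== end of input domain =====

-- B replaces A's rebuilt [0]+comma-index list and reset-label inner scan by a single enumerate
-- comprehension with a closed-form label (simpler, same complexity); return-value equivalence only.

-- ===== PORT A =====
-- list.index('19', index): scan from position `index`; returns the absolute index (Python int).
def pvScan19 : List String → Int → Option Int
  | [], _ => none
  | a :: t, base => if a == "19" then some base else pvScan19 t (base + 1)

-- the `while True` of find_Comma_Index; fuel loc.length suffices: the start index strictly increases.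
def pvFindCommaLoop (loc : List String) : Nat → List Int → Nat → List Int
  | _, acc, 0 => acc
  | i, acc, fuel + 1 =>
    match pvScan19 (loc.drop i) (i : Int) with
    | none => acc
    | some j => pvFindCommaLoop loc (j.toNat + 1) (acc ++ [j]) fuel

-- find_Location_List; none = ValueError of List.index('99').
def pvFindLocationList (row : List String) : Option (List String × List String) :=
  match PySem.List.index? row "99" with
  | none => none
  | some start =>
      some (PySem.List.slice row none (some ((start : Int) + 1)),
            PySem.List.slice row (some ((start : Int) + 1)) none)

-- the per-row label of A's else branch; none = ValueError of int(). The foldl's init 0 is never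
-- observed: Comma_Index_List always starts with 0, so the loop body runs at least once.
def pvRowLabelA (loc : List String) (s0 : String) : Option Int :=
  if s0 == "0" then some 0
  else if s0 == "34" then some 4
  else
    match PySem.Int.ofStr? s0 with
    | none => none
    | some n =>
      let cil := pvFindCommaLoop loc 0 [0] loc.length
      some ((PySem.List.pyRange 0 (cil.length : Int) 1).foldl
        (fun _ j => if n > PySem.List.pyGetD cil j 0 then j else 0) 0)

-- the main `for i in range(len(List))` loop; Speaker is walked in step with List_ (Speaker[i]);
-- none = any raise (IndexError on Speaker[i]/Speaker[i][0], ValueError of index('99') or int()).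
def pvGoA : List (List String) → List (List String) → List (List String) → List (List String) →
    List Int → Option (List (List String) × List (List String) × List Int)
  | [], _, pos, locs, labs => some (pos, locs, labs)
  | _ :: _, [], _, _, _ => none
  | row :: rest, sp :: sps, pos, locs, labs =>
    match pvFindLocationList row with
    | none => none
    | some (p, l) =>
      match sp.head? with
      | none => none
      | some s0 =>
        match pvRowLabelA l s0 with
        | none => none
        | some lab => pvGoA rest sps (pos ++ [p]) (locs ++ [l]) (labs ++ [lab])

def change_Label_By_Split_Comma (List_ : List (List String)) (Speaker : List (List String)) :
    List (List String) × List (List String) × List Int :=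
  (pvGoA List_ Speaker [] [] []).getD ([], [], [])

-- ===== PORT B =====
-- positions = [k for k, v in enumerate(loc) if v == '19']
def pvOcc (loc : List String) (base : Int) : List Int :=
  (PySem.List.enumerate loc base).filterMap (fun p => if p.2 == "19" then some p.1 else none)

-- _comma_label; none = ValueError of int(s).
def pvCommaLabelB (loc : List String) (s : String) : Option Int :=
  if s == "0" then some 0
  else if s == "34" then some 4
  else
    match PySem.Int.ofStr? s with
    | none => none
    | some n =>
      let positions := pvOcc loc 0
      let last := positions.getLast?.getD 0
      some (if n > last then (positions.length : Int) else 0)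

-- the `for row, sp in zip(List, Speaker)` loop, building the three lists front-to-back.
def pvGoB : List (List String × List String) →
    Option (List (List String) × List (List String) × List Int)
  | [] => some ([], [], [])
  | (row, sp) :: rest =>
    match PySem.List.index? row "99" with
    | none => none
    | some start =>
      let cut := start + 1
      match sp.head? with
      | none => none
      | some s0 =>
        match pvCommaLabelB (row.drop cut) s0 with
        | none => none
        | some lab =>
          match pvGoB rest with
          | none => none
          | some (ps, ls, lbs) => some (row.take cut :: ps, row.drop cut :: ls, lab :: lbs)

def change_Label_By_Split_Comma_alt (List_ : List (List String)) (Speaker : List (List String)) :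
    List (List String) × List (List String) × List Int :=
  (pvGoB (List_.zip Speaker)).getD ([], [], [])

-- ===== PRECONDITION & SPEC =====
-- Pre_ excludes exactly the inputs where A raises: Speaker shorter than List_ (IndexError), a row
-- without '99' (ValueError), an empty Speaker[i] (IndexError), or a first Speaker entry other than
-- '0'/'34' that int() cannot parse (ValueError).
def Pre_change_Label_By_Split_Comma (List_ : List (List String)) (Speaker : List (List String)) : Prop :=
  List_.length ≤ Speaker.length ∧
  ∀ p ∈ List_.zip Speaker, "99" ∈ p.1 ∧ p.2 ≠ [] ∧
    (p.2.headD "" ≠ "0" → p.2.headD "" ≠ "34" → (PySem.Int.ofStr? (p.2.headD "")).isSome = true)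
instance (List_ : List (List String)) (Speaker : List (List String)) : Decidable (Pre_change_Label_By_Split_Comma List_ Speaker) := by unfold Pre_change_Label_By_Split_Comma; infer_instance

def pvWitness_change_Label_By_Split_Comma : List (List String) × List (List String) :=
  ([["99", "19"]], [["3"]])

def Spec_change_Label_By_Split_Comma (List_ : List (List String)) (Speaker : List (List String)) (out : List (List String) × List (List String) × List Int) : Prop := out = change_Label_By_Split_Comma_alt List_ Speaker
instance (List_ : List (List String)) (Speaker : List (List String)) (out : List (List String) × List (List String) × List Int) : Decidable (Spec_change_Label_By_Split_Comma List_ Speaker out) := by unfold Spec_change_Label_By_Split_Comma; infer_instance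

-- ===== CLAIM (what is proved, stated in full; the proofs are below) =====
def Claim_equal_change_Label_By_Split_Comma : Prop := ∀ (List_ : List (List String)) (Speaker : List (List String)), Dom_change_Label_By_Split_Comma List_ Speaker → Pre_change_Label_By_Split_Comma List_ Speaker → Spec_change_Label_By_Split_Comma List_ Speaker (change_Label_By_Split_Comma List_ Speaker)


-- ===== LEMMAS AND PROOFS =====

lemma pvOcc_cons_pos (a : String) (t : List String) (b : Int) (ha : (a == "19") = true) :
    pvOcc (a :: t) b = b :: pvOcc t (b + 1) := by
  simp only [pvOcc, PySem.List.enumerate_cons, List.filterMap_cons]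
  rw [if_pos ha]

lemma pvOcc_cons_neg (a : String) (t : List String) (b : Int) (ha : ¬ (a == "19") = true) :
    pvOcc (a :: t) b = pvOcc t (b + 1) := by
  simp only [pvOcc, PySem.List.enumerate_cons, List.filterMap_cons]
  rw [if_neg ha]

lemma pvScan19_none (l : List String) : ∀ b : Int, pvScan19 l b = none → pvOcc l b = [] := by
  induction l with
  | nil => intro b _; simp [pvOcc, PySem.List.enumerate_nil]
  | cons a t ih =>
    intro b h
    simp only [pvScan19] at h
    by_cases ha : (a == "19") = true
    · rw [if_pos ha] at h; cases h
    · rw [if_neg ha] at h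
      rw [pvOcc_cons_neg a t b ha]
      exact ih (b + 1) h

lemma pvScan19_some (l : List String) : ∀ b j : Int, pvScan19 l b = some j →
    b ≤ j ∧ pvOcc l b = j :: pvOcc (l.drop (j + 1 - b).toNat) (j + 1) := by
  induction l with
  | nil => intro b j h; simp [pvScan19] at h
  | cons a t ih =>
    intro b j h
    simp only [pvScan19] at h
    by_cases ha : (a == "19") = true
    · rw [if_pos ha] at h
      injection h with hj
      subst hj
      refine ⟨le_refl _, ?_⟩
      have h1 : (b + 1 - b).toNat = 1 := by omega
      rw [h1, List.drop_one, List.tail_cons, pvOcc_cons_pos a t b ha]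
    · rw [if_neg ha] at h
      obtain ⟨hle, hocc⟩ := ih (b + 1) j h
      refine ⟨by omega, ?_⟩
      have h1 : (j + 1 - b).toNat = (j + 1 - (b + 1)).toNat + 1 := by omega
      rw [h1, List.drop_succ_cons, pvOcc_cons_neg a t b ha]
      exact hocc

lemma pvFindCommaLoop_eq (loc : List String) : ∀ (fuel i : Nat) (acc : List Int),
    loc.length ≤ i + fuel →
    pvFindCommaLoop loc i acc fuel = acc ++ pvOcc (loc.drop i) (i : Int) := by
  intro fuel
  induction fuel with
  | zero =>
    intro i acc hlen
    have : loc.drop i = [] := List.drop_eq_nil_of_le (by omega)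
    simp [pvFindCommaLoop, this, pvOcc, PySem.List.enumerate_nil]
  | succ fuel ih =>
    intro i acc hlen
    cases hscan : pvScan19 (loc.drop i) (i : Int) with
    | none => simp [pvFindCommaLoop, hscan, pvScan19_none _ _ hscan]
    | some j =>
      simp only [pvFindCommaLoop, hscan]
      obtain ⟨hle, hocc⟩ := pvScan19_some _ _ _ hscan
      have hdrop : (loc.drop i).drop (j + 1 - (i : Int)).toNat = loc.drop (j.toNat + 1) := by
        rw [List.drop_drop]
        congr 1
        omega
      have hcast : (j : Int) + 1 = ((j.toNat + 1 : Nat) : Int) := by omega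
      rw [ih (j.toNat + 1) (acc ++ [j]) (by omega), hocc, hdrop, hcast]
      simp

lemma pvFoldl_overwrite {α β : Type} (g : α → β) : ∀ (l : List α) (a : β),
    l.foldl (fun _ x => g x) a = (l.map g).getLastD a := by
  intro l
  induction l with
  | nil => intro a; simp
  | cons x t ih =>
    intro a
    simp only [List.foldl_cons]
    rw [ih (g x), List.map_cons, List.getLastD_cons]

lemma pvLabel_eq (loc : List String) (s0 : String) :
    pvRowLabelA loc s0 = pvCommaLabelB loc s0 := by
  unfold pvRowLabelA pvCommaLabelB
  by_cases h0 : s0 == "0"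
  · simp [h0]
  by_cases h34 : s0 == "34"
  · simp [h0, h34]
  simp only [h0, h34]
  cases hn : PySem.Int.ofStr? s0 with
  | none => rfl
  | some n =>
    simp only []
    congr 1
    -- the comma-index list is 0 followed by the positions of '19'
    have hcil : pvFindCommaLoop loc 0 [0] loc.length = 0 :: pvOcc loc 0 := by
      have := pvFindCommaLoop_eq loc loc.length 0 [0] (by omega)
      simpa using this
    rw [hcil]
    set m := pvOcc loc 0 with hm
    have hlen : ((0 :: m : List Int).length : Int) = ((m.length + 1 : Nat) : Int) := by simp
    rw [hlen, PySem.List.pyRange_zero_natCast, pvFoldl_overwrite, List.map_map,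
      List.range_succ, List.map_append]
    simp only [List.map_cons, List.map_nil, List.getLastD_concat, Function.comp_apply]
    rw [PySem.List.pyGetD_natCast]
    cases hlast : m.getLast? with
    | none =>
      have hnil : m = [] := List.getLast?_eq_none_iff.mp hlast
      simp [hnil]
    | some x =>
      have hne : m ≠ [] := by
        intro h; rw [h] at hlast; simp at hlast
      obtain ⟨y, t, hyt⟩ := List.exists_cons_of_ne_nil hne
      have hgl : (0 :: m : List Int).getD m.length 0 = x := by
        have h1 : (0 :: m : List Int).getD m.length 0 = m.getD (m.length - 1) 0 := by
          rw [hyt]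
          show ((0 : Int) :: y :: t).getD (t.length + 1) 0 = (y :: t).getD t.length 0
          rw [List.getD_cons_succ]
        rw [h1, List.getD, ← List.getLast?_eq_getElem?, hlast]
        rfl
      rw [hgl]
      simp

lemma pvGoA_eq : ∀ (rows sps : List (List String)) (pos locs : List (List String)) (labs : List Int),
    rows.length ≤ sps.length →
    (∀ p ∈ rows.zip sps, "99" ∈ p.1 ∧ p.2 ≠ [] ∧
      (p.2.headD "" ≠ "0" → p.2.headD "" ≠ "34" → (PySem.Int.ofStr? (p.2.headD "")).isSome = true)) →
    pvGoA rows sps pos locs labs =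
      (pvGoB (rows.zip sps)).map (fun t => (pos ++ t.1, locs ++ t.2.1, labs ++ t.2.2)) := by
  intro rows
  induction rows with
  | nil => intro sps pos locs labs _ _; simp [pvGoA, pvGoB]
  | cons row rest ih =>
    intro sps pos locs labs hlen hpre
    cases sps with
    | nil => simp at hlen
    | cons sp sps' =>
      obtain ⟨h99, hne, hint⟩ := hpre (row, sp) (by simp [List.zip_cons_cons])
      obtain ⟨start, hstart⟩ : ∃ k, PySem.List.index? row "99" = some k := by
        have := (PySem.List.index?_isSome_iff row "99").mpr h99
        exact Option.isSome_iff_exists.mp this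
      obtain ⟨s0, tl, rfl⟩ : ∃ s0 tl, sp = s0 :: tl := by
        cases sp with
        | nil => exact absurd rfl hne
        | cons s0 tl => exact ⟨s0, tl, rfl⟩
      have hslice1 : PySem.List.slice row none (some ((start : Int) + 1)) = row.take (start + 1) := by
        have : ((start : Int) + 1) = ((start + 1 : Nat) : Int) := by push_cast; ring
        rw [this, PySem.List.slice_to_natCast]
      have hslice2 : PySem.List.slice row (some ((start : Int) + 1)) none = row.drop (start + 1) := by
        have : ((start : Int) + 1) = ((start + 1 : Nat) : Int) := by push_cast; ring
        rw [this, PySem.List.slice_from_natCast]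
      have hlab : ∃ lab, pvCommaLabelB (row.drop (start + 1)) s0 = some lab := by
        unfold pvCommaLabelB
        by_cases h0 : (s0 == "0") = true
        · exact ⟨0, by rw [if_pos h0]⟩
        by_cases h34 : (s0 == "34") = true
        · exact ⟨4, by rw [if_neg h0, if_pos h34]⟩
        have hint' : s0 ≠ "0" → s0 ≠ "34" → (PySem.Int.ofStr? s0).isSome = true := hint
        have hs : (PySem.Int.ofStr? s0).isSome = true :=
          hint' (fun h => h0 (by simp [h])) (fun h => h34 (by simp [h]))
        obtain ⟨n, hn⟩ := Option.isSome_iff_exists.mp hs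
        rw [if_neg h0, if_neg h34, hn]
        exact ⟨_, rfl⟩
      obtain ⟨lab, hlab⟩ := hlab
      have hlabA : pvRowLabelA (row.drop (start + 1)) s0 = some lab := by
        rw [pvLabel_eq]; exact hlab
      have hpre' : ∀ p ∈ rest.zip sps', "99" ∈ p.1 ∧ p.2 ≠ [] ∧
          (p.2.headD "" ≠ "0" → p.2.headD "" ≠ "34" →
            (PySem.Int.ofStr? (p.2.headD "")).isSome = true) := by
        intro p hp
        exact hpre p (by simp [List.zip_cons_cons, hp])
      have hlen' : rest.length ≤ sps'.length := by simpa using hlen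
      simp only [pvGoA, pvFindLocationList, hstart, hslice1, hslice2, List.head?_cons, hlabA]
      rw [ih sps' _ _ _ hlen' hpre']
      simp only [List.zip_cons_cons, pvGoB, hstart, List.head?_cons, hlab]
      cases hgb : pvGoB (rest.zip sps') with
      | none => rfl
      | some t =>
        obtain ⟨ps, ls, lbs⟩ := t
        simp

-- ===== VERDICT (by name: the statement is the Claim_ definition above) =====
theorem change_Label_By_Split_Comma_spec : Claim_equal_change_Label_By_Split_Comma := by
  intro List_ Speaker _ hPre
  unfold Spec_change_Label_By_Split_Comma change_Label_By_Split_Comma change_Label_By_Split_Comma_alt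
  rw [pvGoA_eq List_ Speaker [] [] [] hPre.1 hPre.2]
  cases pvGoB (List_.zip Speaker) with
  | none => rfl
  | some t => obtain ⟨a, b, c⟩ := t; simp
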